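-- pv_equiv track=rewrite | github.com/ellismckenzielee/codewars-python | evenly_distribute_values_in_array.py | distribute_evenly
-- ===== SOURCE A (Python) =====
-- def distribute_evenly(lst):
--     itms = []
--     output = []
--     for itm in lst:
--         if itm not in itms:
--             itms.append(itm)
--
--     while len(lst) > 0:
--         for itm in itms:
--             if itm in lst:
--                 del lst[lst.index(itm)]
--                 output.append(itm)
--     return output
-- ===== SOURCE B (Python) =====
-- def distribute_evenly(lst):
--     # Decorate-and-sort: tag each element with (occurrence index, first-seen rank)
--     # and do one stable key-sort; no round-robin passes at all.
--     # Note: A empties its argument in place; B does not mutate lst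
--     # (the equivalence is about the return value).
--     rank = {}
--     occ = {}
--     keyed = []
--     for x in lst:
--         if x in rank:
--             r = rank[x]
--         else:
--             r = len(rank)
--             rank[x] = r
--         c = occ.get(x, 0)
--         occ[x] = c + 1
--         keyed.append((c, r, x))
--     keyed.sort(key=lambda t: (t[0], t[1]))
--     return [t[2] for t in keyed]
-- ===== Notes on version B (the rewrite author's own statement) =====
-- stated objective: faster
-- what changed: B is a decorate-and-sort: one pass tags each element with (occurrence index, first-seen rank) and a single key-sort produces the interleaving, replacing A's repeated round-robin scans with 'in'/index/del over the shrinking list.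
import Mathlib
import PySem

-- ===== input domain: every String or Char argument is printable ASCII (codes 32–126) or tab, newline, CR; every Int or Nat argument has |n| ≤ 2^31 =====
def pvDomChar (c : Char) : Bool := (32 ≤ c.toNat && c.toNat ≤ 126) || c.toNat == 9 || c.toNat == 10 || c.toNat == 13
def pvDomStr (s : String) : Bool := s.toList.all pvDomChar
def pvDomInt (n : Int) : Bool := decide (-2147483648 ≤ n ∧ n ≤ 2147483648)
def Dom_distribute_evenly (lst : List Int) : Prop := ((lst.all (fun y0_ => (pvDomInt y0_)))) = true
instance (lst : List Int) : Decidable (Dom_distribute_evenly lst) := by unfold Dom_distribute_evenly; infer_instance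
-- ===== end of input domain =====

-- B replaces A's repeated round-robin scans/deletions over the shrinking list by a decorate-and-sort:
-- one pass tags each element with (occurrence index, first-seen rank) and a single key-sort yields the
-- interleaving. A empties its argument list in place; B does not mutate it — the equivalence proved
-- here is about the return value only.


-- ===== PORT A =====
-- for itm in lst: if itm not in itms: itms.append(itm)
def dedupA (lst : List Int) : List Int :=
  lst.foldl (fun itms itm => if itms.contains itm then itms else itms ++ [itm]) []

-- one 'for itm in itms' pass of the while body; state = (lst, output);
-- 'del lst[lst.index(itm)]' deletes the first occurrence of itm, i.e. List.erase
def passA (itms : List Int) (st : List Int × List Int) : List Int × List Int :=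
  itms.foldl (fun st itm =>
    if st.1.contains itm then (st.1.erase itm, st.2 ++ [itm]) else st) st

-- 'while len(lst) > 0': fuel is a totality device only; each pass with lst ≠ [] removes at
-- least one element, so lst.length + 1 iterations always reach the exit test
def loopA : Nat → List Int → List Int → List Int → List Int
  | 0, _, _, output => output
  | fuel+1, itms, lst, output =>
    if lst.length > 0 then
      let st := passA itms (lst, output)
      loopA fuel itms st.1 st.2
    else output

def distribute_evenly (lst : List Int) : List Int :=
  loopA (lst.length + 1) (dedupA lst) lst []

-- ===== PORT B =====
-- loop body: r = rank[x] if present else (len(rank), inserting); c = occ.get(x, 0);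
-- occ[x] = c + 1; keyed.append((c, r, x)); state = (rank, occ, keyed)
def stepB (st : PySem.Dict Int Int × PySem.Dict Int Int × List (Int × Int × Int)) (x : Int) :
    PySem.Dict Int Int × PySem.Dict Int Int × List (Int × Int × Int) :=
  let rr : Int × PySem.Dict Int Int :=
    match st.1.get? x with
    | some r => (r, st.1)
    | none => ((st.1.keys.length : Int), st.1.insert x (st.1.keys.length : Int))
  let c := st.2.1.getD x 0
  (rr.2, st.2.1.insert x (c + 1), st.2.2 ++ [(c, rr.1, x)])

-- keyed.sort(key=lambda t: (t[0], t[1])) is PySem.List.sorted2; then [t[2] for t in keyed]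
def distribute_evenly_alt (lst : List Int) : List Int :=
  (PySem.List.sorted2 (lst.foldl stepB (PySem.Dict.empty, PySem.Dict.empty, [])).2.2
    (fun t => t.1) (fun t => t.2.1) false).map (fun t => t.2.2)

-- ===== PRECONDITION & SPEC =====
def Spec_distribute_evenly (lst : List Int) (out : List Int) : Prop := out = distribute_evenly_alt lst
instance (lst : List Int) (out : List Int) : Decidable (Spec_distribute_evenly lst out) := by unfold Spec_distribute_evenly; infer_instance

-- ===== CLAIM (what is proved, stated in full; the proofs are below) =====
def Claim_equal_distribute_evenly : Prop := ∀ (lst : List Int), Dom_distribute_evenly lst → Spec_distribute_evenly lst (distribute_evenly lst)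

-- ===== LEMMAS AND PROOFS =====

-- the round-major canonical form both programs compute: round i lists, in first-seen
-- order, the distinct values occurring more than i times
def roundF (lst : List Int) (i : Nat) : List Int :=
  (PySem.List.dedup lst).filter (fun v => decide (i < lst.count v))

def roundT (lst : List Int) (i : Nat) : List (Int × Int × Int) :=
  (roundF lst i).map (fun v => ((i : Int), (((PySem.List.dedup lst).idxOf v : Nat) : Int), v))

def canonT (lst : List Int) : List (Int × Int × Int) :=
  (List.range lst.length).flatMap (roundT lst)

-- the strict comparison sorted2 uses for the key pair (t.1, t.2.1)
def ltT (a b : Int × Int × Int) : Bool :=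
  decide (a.1 < b.1) || (!decide (b.1 < a.1) && decide (a.2.1 < b.2.1))

-- ---------- A-side: loopA computes the round-major flatMap ----------

lemma passA_spec : ∀ (itms : List Int), itms.Nodup → ∀ (lst out : List Int),
    (passA itms (lst, out)).2 = out ++ itms.filter (fun v => decide (v ∈ lst)) ∧
    (∀ v : Int, (passA itms (lst, out)).1.count v
        = lst.count v - (if v ∈ itms ∧ v ∈ lst then 1 else 0)) ∧
    (passA itms (lst, out)).1.length + (itms.filter (fun v => decide (v ∈ lst))).length
        = lst.length := by
  intro itms
  induction itms with
  | nil => intro _ lst out; simp [passA]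
  | cons itm rest ih =>
    intro hnd lst out
    rcases List.nodup_cons.mp hnd with ⟨hni, hnd'⟩
    by_cases hmem : itm ∈ lst
    · have hstep : passA (itm :: rest) (lst, out) = passA rest (lst.erase itm, out ++ [itm]) := by
        simp [passA, hmem]
      obtain ⟨ho, hc, hl⟩ := ih hnd' (lst.erase itm) (out ++ [itm])
      have hfil : rest.filter (fun v => decide (v ∈ lst.erase itm))
          = rest.filter (fun v => decide (v ∈ lst)) := by
        apply List.filter_congr
        intro v hv
        have : v ≠ itm := fun h => hni (h ▸ hv)
        simp [List.mem_erase_of_ne this]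
      refine ⟨?_, ?_, ?_⟩
      · rw [hstep, ho, hfil]
        simp [hmem]
      · intro v
        rw [hstep, hc v]
        by_cases hv : v = itm
        · subst hv
          have : v ∉ rest := hni
          simp [List.count_erase_self, hmem, hni]
        · rw [List.count_erase_of_ne hv]
          have h1 : (v ∈ itm :: rest ∧ v ∈ lst) ↔ (v ∈ rest ∧ v ∈ lst.erase itm) := by
            constructor
            · rintro ⟨ha, hb⟩
              exact ⟨(List.mem_cons.mp ha).resolve_left hv, (List.mem_erase_of_ne hv).mpr hb⟩
            · rintro ⟨ha, hb⟩
              exact ⟨by simp [ha], (List.mem_erase_of_ne hv).mp hb⟩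
          by_cases h2 : v ∈ rest ∧ v ∈ lst.erase itm
          · simp [h2, h1.mpr h2]
          · have h3 : ¬((v = itm ∨ v ∈ rest) ∧ v ∈ lst) := by
              rintro ⟨hor, hl2⟩
              rcases hor with h | h
              · exact hv h
              · exact h2 (h1.mp ⟨by simp [h], hl2⟩)
            simp [h2, h3]
      · rw [hstep]
        rw [hfil] at hl
        have := List.length_erase_of_mem hmem
        have hpos : 0 < lst.length := List.length_pos_of_mem hmem
        simp [hmem] at hl ⊢
        omega
    · have hstep : passA (itm :: rest) (lst, out) = passA rest (lst, out) := by
        simp [passA, hmem]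
      obtain ⟨ho, hc, hl⟩ := ih hnd' lst out
      refine ⟨?_, ?_, ?_⟩
      · rw [hstep, ho]; simp [hmem]
      · intro v
        rw [hstep, hc v]
        by_cases hv : v = itm
        · subst hv; simp [hmem, hni]
        · have : (v ∈ itm :: rest ∧ v ∈ lst) ↔ (v ∈ rest ∧ v ∈ lst) := by
            constructor
            · rintro ⟨ha, hb⟩; exact ⟨(List.mem_cons.mp ha).resolve_left hv, hb⟩
            · rintro ⟨ha, hb⟩; exact ⟨by simp [ha], hb⟩
          by_cases h2 : v ∈ rest ∧ v ∈ lst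
          · simp [h2, this.mpr h2]
          · have h3 : ¬((v = itm ∨ v ∈ rest) ∧ v ∈ lst) := by
              rintro ⟨hor, hl2⟩
              rcases hor with h | h
              · exact hv h
              · exact h2 ⟨h, hl2⟩
            simp [h2, h3]
      · rw [hstep]; simpa [List.filter_cons, hmem] using hl

lemma loopA_eq : ∀ (fuel : Nat) (itms lst out : List Int) (n : Nat),
    itms.Nodup → (∀ v ∈ lst, v ∈ itms) → lst.length < fuel → (∀ v : Int, lst.count v ≤ n) →
    loopA fuel itms lst out
      = out ++ (List.range n).flatMap (fun i => itms.filter (fun v => decide (i < lst.count v))) := by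
  intro fuel
  induction fuel with
  | zero => intro itms lst out n _ _ hf _; omega
  | succ s ih =>
    intro itms lst out n hnd hsub hf hcnt
    rcases List.eq_nil_or_concat lst with hnil | ⟨_, _, hne⟩
    · subst hnil
      have : ∀ i : Nat, itms.filter (fun v => decide (i < List.count v ([] : List Int))) = [] := by
        intro i; simp
      simp only [loopA, List.length_nil, gt_iff_lt, lt_irrefl, if_false, this]
      simp
    · have hlst : lst ≠ [] := by rw [hne]; simp
      have hpos : 0 < lst.length := List.length_pos_iff.mpr hlst
      obtain ⟨w, hw⟩ : ∃ w, w ∈ lst := List.exists_mem_of_ne_nil lst hlst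
      have hw1 : 1 ≤ lst.count w := List.one_le_count_iff.mpr hw
      have hn1 : 1 ≤ n := le_trans hw1 (hcnt w)
      obtain ⟨m, rfl⟩ : ∃ m, n = m + 1 := ⟨n - 1, by omega⟩
      obtain ⟨ho, hc, hl⟩ := passA_spec itms hnd lst out
      simp only [loopA, gt_iff_lt, hpos, if_true]
      have hfil0 : itms.filter (fun v => decide ((0:Nat) < lst.count v))
          = itms.filter (fun v => decide (v ∈ lst)) := by
        apply List.filter_congr
        intro v _
        simp [List.count_pos_iff]
      have hflen : 0 < (itms.filter (fun v => decide (v ∈ lst))).length := by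
        have : w ∈ itms.filter (fun v => decide (v ∈ lst)) :=
          List.mem_filter.mpr ⟨hsub w hw, by simpa using hw⟩
        exact List.length_pos_of_mem this
      have hih := ih itms (passA itms (lst, out)).1 (passA itms (lst, out)).2 m hnd
        (by
          intro v hv
          have hwc : 0 < (passA itms (lst, out)).1.count v := List.count_pos_iff.mpr hv
          rw [hc v] at hwc
          exact hsub v (List.count_pos_iff.mp (by omega)))
        (by omega)
        (by
          intro v
          rw [hc v]
          by_cases hvl : v ∈ lst
          · have := hcnt v
            have h1 : 1 ≤ lst.count v := List.one_le_count_iff.mpr hvl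
            by_cases hvi : v ∈ itms
            · simp [hvi, hvl]; omega
            · exact absurd (hsub v hvl) hvi
          · have : lst.count v = 0 := List.count_eq_zero.mpr hvl
            simp [this])
      rw [hih, ho]
      have hrange : List.range (m + 1) = 0 :: List.map Nat.succ (List.range m) :=
        List.range_succ_eq_map
      rw [hrange]
      simp only [List.flatMap_cons, List.flatMap_map]
      rw [hfil0]
      have htail : ∀ i ∈ List.range m,
          itms.filter (fun v => decide (Nat.succ i < lst.count v))
            = itms.filter (fun v => decide (i < (passA itms (lst, out)).1.count v)) := by
        intro i _
        apply List.filter_congr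
        intro v hvi
        rw [hc v]
        by_cases hvl : v ∈ lst
        · have h1 : 1 ≤ lst.count v := List.one_le_count_iff.mpr hvl
          simp [hvi, hvl]
          constructor <;> omega
        · have : lst.count v = 0 := List.count_eq_zero.mpr hvl
          simp [this]
      rw [List.flatMap_congr htail]
      simp [List.append_assoc]

lemma dedupA_eq_dedup (lst : List Int) : dedupA lst = PySem.List.dedup lst := by
  rfl

lemma A_flat (lst : List Int) :
    distribute_evenly lst = (List.range lst.length).flatMap (roundF lst) := by
  unfold distribute_evenly
  rw [dedupA_eq_dedup]
  rw [loopA_eq (lst.length + 1) (PySem.List.dedup lst) lst [] lst.length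
    (PySem.List.nodup_dedup lst)
    (fun v hv => (PySem.List.mem_dedup lst v).mpr hv)
    (by omega)
    (fun v => List.count_le_length)]
  rfl

-- ---------- generic facts about dedup / filter / flatMap permutations ----------

lemma dedup_append_singleton (p : List Int) (x : Int) :
    PySem.List.dedup (p ++ [x])
      = if x ∈ p then PySem.List.dedup p else PySem.List.dedup p ++ [x] := by
  have h : PySem.List.dedup (p ++ [x]) = PySem.Set.add (PySem.List.dedup p) x := by
    simp [PySem.List.dedup, PySem.Set.ofList, List.foldl_append]
  rw [h]
  by_cases hx : x ∈ p
  · have : (PySem.List.dedup p).contains x = true := by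
      simpa [List.contains_iff_mem, PySem.List.mem_dedup] using hx
    simp [PySem.Set.add]
  · have : (PySem.List.dedup p).contains x = false := by
      simp; exact hx
    simp [PySem.Set.add]

lemma idxOf_pairwise : ∀ (ks : List Int), ks.Nodup →
    ks.Pairwise (fun a b => ks.idxOf a < ks.idxOf b) := by
  intro ks
  induction ks with
  | nil => intro _; simp
  | cons k ks ih =>
    intro hnd
    rcases List.nodup_cons.mp hnd with ⟨hk, hnd'⟩
    refine List.pairwise_cons.mpr ⟨?_, ?_⟩
    · intro b hb
      have hbk : b ≠ k := fun h => hk (h ▸ hb)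
      have h1 : (k :: ks).idxOf k = 0 := by simp
      have h2 : (k :: ks).idxOf b = ks.idxOf b + 1 := by
        simp [hbk.symm]
      omega
    · refine List.Pairwise.imp_of_mem ?_ (ih hnd')
      intro a b ha hb hab
      have hak : a ≠ k := fun h => hk (h ▸ ha)
      have hbk : b ≠ k := fun h => hk (h ▸ hb)
      have h1 : (k :: ks).idxOf a = ks.idxOf a + 1 := by
        simp [hak.symm]
      have h2 : (k :: ks).idxOf b = ks.idxOf b + 1 := by
        simp [hbk.symm]
      omega

lemma filter_perm_of_flip : ∀ (ks : List Int) (x : Int) (p q : Int → Bool), ks.Nodup → x ∈ ks →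
    p x = false → q x = true → (∀ v ∈ ks, v ≠ x → q v = p v) →
    (ks.filter q).Perm (x :: ks.filter p) := by
  intro ks
  induction ks with
  | nil => intro x p q _ hx; simp at hx
  | cons k ks ih =>
    intro x p q hnd hx hpx hqx hagree
    rcases List.nodup_cons.mp hnd with ⟨hknotin, hnd'⟩
    by_cases hkx : k = x
    · subst hkx
      have hrest : ks.filter q = ks.filter p := by
        apply List.filter_congr
        intro v hv
        exact hagree v (by simp [hv]) (fun h => hknotin (h ▸ hv))
      simp [hqx, hpx, hrest]
    · have hx' : x ∈ ks := by
        rcases List.mem_cons.mp hx with h | h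
        · exact absurd h.symm hkx
        · exact h
      have hk : q k = p k := hagree k (by simp) hkx
      by_cases hpk : p k = true
      · simp only [List.filter_cons, hk, hpk, if_true]
        exact ((ih x p q hnd' hx' hpx hqx
          (fun v hv hvx => hagree v (by simp [hv]) hvx)).cons k).trans (List.Perm.swap x k _)
      · have hqk : q k = false := by rw [hk]; simpa using hpk
        simp only [List.filter_cons, hqk, hpk]
        simpa using ih x p q hnd' hx' hpx hqx (fun v hv hvx => hagree v (by simp [hv]) hvx)

lemma flatMap_range_perm {α : Type} (f g : Nat → List α) (n c : Nat) (t : α)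
    (hc : c < n) (hne : ∀ i, i ≠ c → g i = f i) (hcp : (g c).Perm (t :: f c)) :
    ((List.range n).flatMap g).Perm ((List.range n).flatMap f ++ [t]) := by
  obtain ⟨m, rfl⟩ : ∃ m, n = (c+1) + m := ⟨n - (c+1), by omega⟩
  rw [List.range_add, List.range_succ]
  have hA : (List.range c).flatMap g = (List.range c).flatMap f :=
    List.flatMap_congr (fun i hi => hne i (by simp at hi; omega))
  have hB : (((List.range m).map (fun x => c + 1 + x)).flatMap g)
      = ((List.range m).map (fun x => c + 1 + x)).flatMap f :=
    List.flatMap_congr (fun i hi => hne i (by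
      rcases List.mem_map.mp hi with ⟨j, _, rfl⟩; omega))
  simp only [List.flatMap_append, hA, hB, List.flatMap_singleton]
  rw [List.append_assoc, List.append_assoc, List.append_assoc]
  refine List.Perm.append_left _ ?_
  refine (List.Perm.append_right _ hcp).trans ?_
  simpa [List.append_assoc] using (List.perm_append_singleton t (f c ++ ((List.range m).map (fun x => c + 1 + x)).flatMap f)).symm

-- one appended element inserts exactly one tuple (count, rank, x) into the canonical form
lemma canonT_append (p : List Int) (x : Int) :
    (canonT (p ++ [x])).Perm
      (canonT p ++ [((p.count x : Int), (((PySem.List.dedup (p ++ [x])).idxOf x : Nat) : Int), x)]) := by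
  have hcount : ∀ v : Int, (p ++ [x]).count v = p.count v + (if v = x then 1 else 0) := by
    intro v
    by_cases h : v = x
    · subst h; simp
    · simp [List.count_append, h, Ne.symm h]
  have hlast : roundT p p.length = [] := by
    have h0 : roundF p p.length = [] := by
      apply List.filter_eq_nil_iff.mpr
      intro v _
      simpa using List.count_le_length (a := v) (l := p)
    simp [roundT, h0]
  have hsplit : (List.range (p.length + 1)).flatMap (roundT p) = canonT p := by
    rw [List.range_succ]
    simp [canonT, List.flatMap_append, hlast]
  have hq : canonT (p ++ [x]) = (List.range (p.length + 1)).flatMap (roundT (p ++ [x])) := by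
    simp [canonT]
  have hmemd : ∀ v ∈ PySem.List.dedup p, v ∈ p := fun v hv => (PySem.List.mem_dedup p v).mp hv
  have hne : ∀ i, i ≠ p.count x → roundT (p ++ [x]) i = roundT p i := by
    intro i hi
    by_cases hx : x ∈ p
    · have hd : PySem.List.dedup (p ++ [x]) = PySem.List.dedup p := by
        rw [dedup_append_singleton]; simp [hx]
      have hf : roundF (p ++ [x]) i = roundF p i := by
        unfold roundF
        rw [hd]
        apply List.filter_congr
        intro v _
        rw [hcount v]
        by_cases hvx : v = x
        · subst hvx; simp; omega
        · simp [hvx]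
      unfold roundT
      rw [hd, hf]
    · have hc0 : p.count x = 0 := List.count_eq_zero.mpr hx
      have hd : PySem.List.dedup (p ++ [x]) = PySem.List.dedup p ++ [x] := by
        rw [dedup_append_singleton]; simp [hx]
      have hxq : (decide (i < (p ++ [x]).count x)) = false := by
        rw [hcount x]
        simp only [hc0]
        simp
        omega
      have hf : roundF (p ++ [x]) i = roundF p i := by
        unfold roundF
        rw [hd, List.filter_append]
        have h1 : List.filter (fun v => decide (i < (p ++ [x]).count v)) [x] = [] := by
          simp only [List.filter_singleton, hxq]
          simp
        rw [h1, List.append_nil]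
        apply List.filter_congr
        intro v hv
        have hvx : v ≠ x := fun h => hx (h ▸ hmemd v hv)
        rw [hcount v]; simp [hvx]
      unfold roundT
      rw [hf]
      apply List.map_congr_left
      intro v hv
      have hvd : v ∈ PySem.List.dedup p := List.mem_of_mem_filter hv
      rw [hd, List.idxOf_append_of_mem hvd]
  have hcp : (roundT (p ++ [x]) (p.count x)).Perm
      (((p.count x : Int), (((PySem.List.dedup (p ++ [x])).idxOf x : Nat) : Int), x)
        :: roundT p (p.count x)) := by
    by_cases hx : x ∈ p
    · have hd : PySem.List.dedup (p ++ [x]) = PySem.List.dedup p := by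
        rw [dedup_append_singleton]; simp [hx]
      have hfp : (roundF (p ++ [x]) (p.count x)).Perm (x :: roundF p (p.count x)) := by
        unfold roundF
        rw [hd]
        apply filter_perm_of_flip _ _ _ _ (PySem.List.nodup_dedup p)
          ((PySem.List.mem_dedup p x).mpr hx)
        · simp
        · rw [hcount x]; simp
        · intro v _ hvx
          rw [hcount v]; simp [hvx]
      unfold roundT
      rw [hd]
      simpa using hfp.map
        (fun v => (((p.count x : Nat) : Int), (((PySem.List.dedup p).idxOf v : Nat) : Int), v))
    · have hc0 : p.count x = 0 := List.count_eq_zero.mpr hx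
      have hd : PySem.List.dedup (p ++ [x]) = PySem.List.dedup p ++ [x] := by
        rw [dedup_append_singleton]; simp [hx]
      have hf : roundF (p ++ [x]) (p.count x) = roundF p (p.count x) ++ [x] := by
        unfold roundF
        rw [hd, List.filter_append]
        have h1 : List.filter (fun v => decide (p.count x < (p ++ [x]).count v)) [x] = [x] := by
          rw [List.filter_singleton]
          simp [hcount x]
        rw [h1]
        congr 1
        apply List.filter_congr
        intro v hv
        have hvx : v ≠ x := fun h => hx (h ▸ hmemd v hv)
        rw [hcount v]; simp [hvx]
      unfold roundT
      rw [hf, List.map_append]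
      have hmeq : (roundF p (p.count x)).map
            (fun v => (((p.count x : Nat) : Int),
              (((PySem.List.dedup (p ++ [x])).idxOf v : Nat) : Int), v))
          = (roundF p (p.count x)).map
            (fun v => (((p.count x : Nat) : Int),
              (((PySem.List.dedup p).idxOf v : Nat) : Int), v)) := by
        apply List.map_congr_left
        intro v hv
        rw [hd, List.idxOf_append_of_mem (List.mem_of_mem_filter hv)]
      rw [hmeq]
      exact List.perm_append_singleton _ _
  rw [hq, ← hsplit]
  have hclt : p.count x < p.length + 1 := by
    have := List.count_le_length (a := x) (l := p); omega
  exact flatMap_range_perm (roundT p) (roundT (p ++ [x])) (p.length + 1) (p.count x) _ hclt hne hcp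

-- ---------- B-side: the fold invariant ----------

lemma stepB_some (st : PySem.Dict Int Int × PySem.Dict Int Int × List (Int × Int × Int))
    (x r : Int) (h : st.1.get? x = some r) :
    stepB st x = (st.1, st.2.1.insert x (st.2.1.getD x 0 + 1),
      st.2.2 ++ [(st.2.1.getD x 0, r, x)]) := by
  unfold stepB
  rw [h]

lemma stepB_none (st : PySem.Dict Int Int × PySem.Dict Int Int × List (Int × Int × Int))
    (x : Int) (h : st.1.get? x = none) :
    stepB st x = (st.1.insert x ((st.1.keys.length : Nat) : Int),
      st.2.1.insert x (st.2.1.getD x 0 + 1),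
      st.2.2 ++ [(st.2.1.getD x 0, ((st.1.keys.length : Nat) : Int), x)]) := by
  unfold stepB
  rw [h]

lemma stepB_inv : ∀ (lst : List Int),
    (∀ v : Int, (lst.foldl stepB (PySem.Dict.empty, PySem.Dict.empty, [])).1.get? v
        = if v ∈ lst then some (((PySem.List.dedup lst).idxOf v : Nat) : Int) else none) ∧
    (lst.foldl stepB (PySem.Dict.empty, PySem.Dict.empty, [])).1.keys.length
        = (PySem.List.dedup lst).length ∧
    (∀ v : Int, (lst.foldl stepB (PySem.Dict.empty, PySem.Dict.empty, [])).2.1.getD v 0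
        = (lst.count v : Int)) ∧
    (lst.foldl stepB (PySem.Dict.empty, PySem.Dict.empty, [])).2.2.Perm (canonT lst) := by
  intro lst
  induction lst using List.reverseRecOn with
  | nil =>
    refine ⟨fun v => rfl, rfl, fun v => rfl, ?_⟩
    simp [canonT]
  | append_singleton p x ih =>
    obtain ⟨h1, h2, h3, h4⟩ := ih
    rw [List.foldl_append]
    simp only [List.foldl_cons, List.foldl_nil]
    set st := p.foldl stepB (PySem.Dict.empty, PySem.Dict.empty, ([] : List (Int × Int × Int)))
      with hst
    have hcnt : ∀ v : Int, (p ++ [x]).count v = p.count v + (if v = x then 1 else 0) := by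
      intro v
      by_cases h : v = x
      · subst h; simp
      · simp [List.count_append, h, Ne.symm h]
    by_cases hx : x ∈ p
    · have hd : PySem.List.dedup (p ++ [x]) = PySem.List.dedup p := by
        rw [dedup_append_singleton]; simp [hx]
      have hget : st.1.get? x = some (((PySem.List.dedup p).idxOf x : Nat) : Int) := by
        rw [h1 x]; simp [hx]
      rw [stepB_some st x _ hget]
      refine ⟨?_, ?_, ?_, ?_⟩
      · intro v
        rw [h1 v, hd]
        by_cases hv : v = x
        · subst hv; simp [hx]
        · by_cases hvp : v ∈ p <;> simp [hvp, hv]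
      · rw [h2, hd]
      · intro v
        rw [PySem.Dict.getD_insert, hcnt v]
        by_cases hv : v = x
        · subst hv; rw [if_pos rfl, h3 v]; simp
        · rw [if_neg hv, h3 v]; simp [hv]
      · refine (List.Perm.append_right _ h4).trans ?_
        refine List.Perm.trans ?_ (canonT_append p x).symm
        rw [h3 x, hd]
    · have hd : PySem.List.dedup (p ++ [x]) = PySem.List.dedup p ++ [x] := by
        rw [dedup_append_singleton]; simp [hx]
      have hc0 : p.count x = 0 := List.count_eq_zero.mpr hx
      have hget : st.1.get? x = none := by rw [h1 x]; simp [hx]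
      have hxd : x ∉ PySem.List.dedup p := fun h => hx ((PySem.List.mem_dedup p x).mp h)
      have hidx : (PySem.List.dedup (p ++ [x])).idxOf x = (PySem.List.dedup p).length := by
        rw [hd, List.idxOf_append, if_neg hxd]
        simp
      have hncont : st.1.contains x = false := by
        rw [PySem.Dict.contains_eq_isSome_get?, hget]; rfl
      rw [stepB_none st x hget]
      refine ⟨?_, ?_, ?_, ?_⟩
      · intro v
        rw [PySem.Dict.get?_insert]
        by_cases hv : v = x
        · subst hv
          rw [if_pos rfl, if_pos (by simp), hidx, h2]
        · rw [if_neg hv, h1 v, hd]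
          by_cases hvp : v ∈ p
          · simp [hvp, hv, List.idxOf_append]
          · simp [hvp, hv]
      · rw [PySem.Dict.keys_insert_of_not_contains st.1 _ hncont, hd]
        simp [h2]
      · intro v
        rw [PySem.Dict.getD_insert, hcnt v]
        by_cases hv : v = x
        · subst hv; rw [if_pos rfl, h3 v]; simp
        · rw [if_neg hv, h3 v]; simp [hv]
      · refine (List.Perm.append_right _ h4).trans ?_
        refine List.Perm.trans ?_ (canonT_append p x).symm
        rw [h3 x, hc0, hidx, h2]

-- ---------- sorted2: any strictly-ltT-increasing permutation is the sort ----------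

lemma ltT_asymm (a b : Int × Int × Int) (h : ltT a b = true) : ltT b a = false := by
  simp [ltT] at h ⊢; omega

lemma ltT_trans' (x y y' : Int × Int × Int) (h1 : ltT x y = true) (h2 : ltT y' y = false) :
    ltT y' x = false := by
  simp [ltT] at h1 h2 ⊢; omega

lemma insertBy_perm (x : Int × Int × Int) : ∀ (ys : List (Int × Int × Int)),
    (PySem.List.insertBy ltT x ys).Perm (x :: ys) := by
  intro ys
  induction ys with
  | nil => simp [PySem.List.insertBy]
  | cons y ys ih =>
    by_cases h : ltT x y = true
    · simp [PySem.List.insertBy, h]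
    · simp only [PySem.List.insertBy, h]
      exact ((ih.cons y).trans (List.Perm.swap x y ys)).symm.symm

lemma insertBy_pairwise (x : Int × Int × Int) : ∀ (ys : List (Int × Int × Int)),
    ys.Pairwise (fun a b => ltT b a = false) →
    (PySem.List.insertBy ltT x ys).Pairwise (fun a b => ltT b a = false) := by
  intro ys
  induction ys with
  | nil => intro _; simp [PySem.List.insertBy]
  | cons y ys ih =>
    intro hp
    rcases List.pairwise_cons.mp hp with ⟨hy, hys⟩
    by_cases h : ltT x y = true
    · simp only [PySem.List.insertBy, h, if_true]
      refine List.pairwise_cons.mpr ⟨?_, hp⟩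
      intro b hb
      rcases List.mem_cons.mp hb with hb | hb
      · subst hb; exact ltT_asymm _ _ h
      · exact ltT_trans' _ _ _ h (hy b hb)
    · simp only [PySem.List.insertBy, h]
      refine List.pairwise_cons.mpr ⟨?_, ih hys⟩
      intro b hb
      rcases (PySem.List.mem_insertBy ltT x b ys).mp hb with hb | hb
      · subst hb; simpa using h
      · exact hy b hb

lemma sortfold_perm : ∀ (xs acc : List (Int × Int × Int)),
    (xs.foldl (fun acc x => PySem.List.insertBy ltT x acc) acc).Perm (acc ++ xs) := by
  intro xs
  induction xs with
  | nil => intro acc; simp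
  | cons x xs ih =>
    intro acc
    simp only [List.foldl_cons]
    refine (ih (PySem.List.insertBy ltT x acc)).trans ?_
    refine (List.Perm.append_right xs (insertBy_perm x acc)).trans ?_
    exact (List.perm_middle (a := x) (l₁ := acc) (l₂ := xs)).symm

lemma sortfold_pairwise : ∀ (xs acc : List (Int × Int × Int)),
    acc.Pairwise (fun a b => ltT b a = false) →
    (xs.foldl (fun acc x => PySem.List.insertBy ltT x acc) acc).Pairwise
      (fun a b => ltT b a = false) := by
  intro xs
  induction xs with
  | nil => intro acc h; simpa using h
  | cons x xs ih =>
    intro acc h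
    simp only [List.foldl_cons]
    exact ih _ (insertBy_pairwise x acc h)

lemma eq_of_perm_of_strict : ∀ (ys zs : List (Int × Int × Int)), zs.Perm ys →
    ys.Pairwise (fun a b => ltT a b = true) → zs.Pairwise (fun a b => ltT b a = false) →
    zs = ys := by
  intro ys
  induction ys with
  | nil => intro zs hp _ _; exact hp.eq_nil
  | cons y ys ih =>
    intro zs hp hy hz
    have hzne : zs ≠ [] := by
      intro h; subst h; exact (by simp at hp)
    rcases zs with _ | ⟨z, zs⟩
    · exact absurd rfl hzne
    by_cases hzy : z = y
    · subst hzy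
      have htl : zs.Perm ys := (List.perm_cons z).mp hp
      have := ih zs htl (List.pairwise_cons.mp hy).2 (List.pairwise_cons.mp hz).2
      rw [this]
    · exfalso
      have hzmem : z ∈ y :: ys := hp.mem_iff.mp (by simp)
      have hz_in_ys : z ∈ ys := by
        rcases List.mem_cons.mp hzmem with h | h
        · exact absurd h hzy
        · exact h
      have h1 : ltT y z = true := (List.pairwise_cons.mp hy).1 z hz_in_ys
      have hymem : y ∈ z :: zs := hp.mem_iff.mpr (by simp)
      have hy_in_zs : y ∈ zs := by
        rcases List.mem_cons.mp hymem with h | h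
        · exact absurd h.symm hzy
        · exact h
      have h2 : ltT y z = false := (List.pairwise_cons.mp hz).1 y hy_in_zs
      simp [h1] at h2

lemma canonT_pairwise (lst : List Int) :
    (canonT lst).Pairwise (fun a b => ltT a b = true) := by
  unfold canonT
  rw [List.pairwise_flatMap]
  constructor
  · intro i _
    unfold roundT
    apply List.Pairwise.map
    · intro a b hab
      simp only [ltT]
      simp
      omega
    · exact (idxOf_pairwise (PySem.List.dedup lst) (PySem.List.nodup_dedup lst)).filter _
  · refine List.pairwise_lt_range.imp ?_
    intro i j hij x hx y hy
    rcases List.mem_map.mp hx with ⟨a, _, rfl⟩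
    rcases List.mem_map.mp hy with ⟨b, _, rfl⟩
    simp only [ltT]
    simp
    omega

lemma sorted2_keyed (lst : List Int) :
    PySem.List.sorted2 (lst.foldl stepB (PySem.Dict.empty, PySem.Dict.empty, [])).2.2
      (fun t => t.1) (fun t => t.2.1) false = canonT lst := by
  obtain ⟨_, _, _, h4⟩ := stepB_inv lst
  have hrepr : PySem.List.sorted2 (lst.foldl stepB (PySem.Dict.empty, PySem.Dict.empty, [])).2.2
      (fun t => t.1) (fun t => t.2.1) false
      = (lst.foldl stepB (PySem.Dict.empty, PySem.Dict.empty, [])).2.2.foldl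
          (fun acc x => PySem.List.insertBy ltT x acc) [] := rfl
  rw [hrepr]
  apply eq_of_perm_of_strict
  · refine (sortfold_perm _ []).trans ?_
    simpa using h4
  · exact canonT_pairwise lst
  · exact sortfold_pairwise _ [] (by simp)

-- ===== VERDICT (by name: the statement is the Claim_ definition above) =====
theorem distribute_evenly_spec : Claim_equal_distribute_evenly := by
  intro lst _
  unfold Spec_distribute_evenly distribute_evenly_alt
  rw [sorted2_keyed, A_flat]
  unfold canonT
  rw [List.map_flatMap]
  refine List.flatMap_congr ?_
  intro i _
  simp [roundT, List.map_map, Function.comp_def]
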